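-- pv_equiv track=rewrite | github.com/sDos280/SimplerC | sic_utils.py | get_line_index_by_char_index
-- ===== SOURCE A (Python) =====
-- def get_line_index_by_char_index(input_string: str, char_index: int) -> int:
--     lines = input_string.split('\n')
--
--     total_chars = 0
--     for line_index, line in enumerate(lines):
--         total_chars += len(line) + 1  # +1 to account for the newline character
--
--         if total_chars > char_index:
--             return line_index
--
--     raise SyntaxError("Index out of range")
-- ===== SOURCE B (Python) =====
-- def get_line_index_by_char_index(input_string: str, char_index: int) -> int:
--     if char_index > len(input_string):
--         raise SyntaxError("Index out of range")
--     return input_string[:max(char_index, 0)].count('\n')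
-- ===== Notes on version B (the rewrite author's own statement) =====
-- stated objective: simpler
-- what changed: Replaces the split-on-newline list and the accumulating length loop by a direct count of the newline characters in the prefix input_string[:char_index] (clamped at 0), after guarding the out-of-range case.
import Mathlib
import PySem

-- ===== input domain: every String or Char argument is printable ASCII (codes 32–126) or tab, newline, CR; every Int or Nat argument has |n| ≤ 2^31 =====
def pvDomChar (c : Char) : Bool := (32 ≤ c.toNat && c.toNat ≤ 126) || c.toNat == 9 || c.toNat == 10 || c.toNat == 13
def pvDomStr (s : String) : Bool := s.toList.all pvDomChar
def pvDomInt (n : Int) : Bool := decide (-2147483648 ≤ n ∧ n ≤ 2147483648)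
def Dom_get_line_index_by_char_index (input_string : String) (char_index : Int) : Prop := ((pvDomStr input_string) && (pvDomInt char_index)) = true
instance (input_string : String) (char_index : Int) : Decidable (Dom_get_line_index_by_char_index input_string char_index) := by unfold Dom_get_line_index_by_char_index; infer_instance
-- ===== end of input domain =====

-- B replaces A's split-on-newline + accumulating length loop by counting the newlines in the
-- clamped prefix input_string[:max(char_index,0)]; equal on Pre_ (where A returns; both raise outside).

-- ===== PORT A =====
-- the 'for line_index, line in enumerate(lines)' loop; state = (line index, total_chars);
-- the [] case is Python's 'raise SyntaxError' fall-through, unreachable under Pre_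
def pvLoopA (ci : Int) : List (List Char) → Int → Int → Int
  | [], idx, _ => idx
  | line :: rest, idx, total =>
    let total' := total + (line.length : Int) + 1
    if total' > ci then idx else pvLoopA ci rest (idx + 1) total'

def get_line_index_by_char_index (input_string : String) (char_index : Int) : Int :=
  pvLoopA char_index (PySem.Chars.splitOn input_string.toList ['\n']) 0 0

-- ===== PORT B =====
-- guard (Python raises there, outside Pre_), then count '\n' in the slice [:max(char_index,0)]
def get_line_index_by_char_index_alt (input_string : String) (char_index : Int) : Int :=
  if char_index > PySem.Str.len input_string then 0
  else (PySem.Chars.count (PySem.Chars.slice input_string.toList none (some (max char_index 0))) ['\n'] : Int)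

-- ===== PRECONDITION & SPEC =====
-- Pre_ excludes exactly the inputs where the Python A raises SyntaxError (char_index past the end);
-- B raises there too.
def Pre_get_line_index_by_char_index (input_string : String) (char_index : Int) : Prop :=
  char_index ≤ PySem.Str.len input_string
instance (input_string : String) (char_index : Int) : Decidable (Pre_get_line_index_by_char_index input_string char_index) := by unfold Pre_get_line_index_by_char_index; infer_instance

def pvWitness_get_line_index_by_char_index : String × Int := ("a\nb", 2)

def Spec_get_line_index_by_char_index (input_string : String) (char_index : Int) (out : Int) : Prop := out = get_line_index_by_char_index_alt input_string char_index
instance (input_string : String) (char_index : Int) (out : Int) : Decidable (Spec_get_line_index_by_char_index input_string char_index out) := by unfold Spec_get_line_index_by_char_index; infer_instance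

-- ===== CLAIM (what is proved, stated in full; the proofs are below) =====
def Claim_equal_get_line_index_by_char_index : Prop := ∀ (input_string : String) (char_index : Int), Dom_get_line_index_by_char_index input_string char_index → Pre_get_line_index_by_char_index input_string char_index → Spec_get_line_index_by_char_index input_string char_index (get_line_index_by_char_index input_string char_index)

-- ===== LEMMAS AND PROOFS =====

-- splitOn.go: the accumulator prepends (reversed)
theorem pv_go_acc (sep : List Char) (fuel : Nat) : ∀ (l cur : List Char) (acc : List (List Char)),
    PySem.Chars.splitOn.go sep fuel l cur acc = acc.reverse ++ PySem.Chars.splitOn.go sep fuel l cur [] := by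
  induction fuel with
  | zero => intro l cur acc; simp [PySem.Chars.splitOn.go]
  | succ f ih =>
    intro l cur acc
    cases l with
    | nil => simp [PySem.Chars.splitOn.go]
    | cons c rest =>
      simp only [PySem.Chars.splitOn.go]
      by_cases h : sep.isPrefixOf (c :: rest) = true
      · simp only [h, if_true]
        rw [ih _ _ (cur.reverse :: acc), ih _ _ [cur.reverse]]
        simp
      · simp only [h, Bool.false_eq_true, if_false]
        exact ih rest (c :: cur) acc

-- splitOn.go: the current-chunk buffer prefixes the head of the result
theorem pv_go_cur (sep : List Char) (fuel : Nat) : ∀ (l cur : List Char),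
    ∃ H T, PySem.Chars.splitOn.go sep fuel l [] [] = H :: T ∧
      PySem.Chars.splitOn.go sep fuel l cur [] = (cur.reverse ++ H) :: T := by
  induction fuel with
  | zero => intro l cur; exact ⟨l, [], by simp [PySem.Chars.splitOn.go], by simp [PySem.Chars.splitOn.go]⟩
  | succ f ih =>
    intro l cur
    cases l with
    | nil => exact ⟨[], [], by simp [PySem.Chars.splitOn.go], by simp [PySem.Chars.splitOn.go]⟩
    | cons c rest =>
      by_cases h : sep.isPrefixOf (c :: rest) = true
      · refine ⟨[], PySem.Chars.splitOn.go sep f (List.drop sep.length (c :: rest)) [] [], ?_, ?_⟩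
        · simp only [PySem.Chars.splitOn.go, h, if_true]
          rw [pv_go_acc]; simp
        · simp only [PySem.Chars.splitOn.go, h, if_true]
          rw [pv_go_acc]; simp
      · obtain ⟨H, T, h1, h2⟩ := ih rest (c :: cur)
        obtain ⟨H', T', h1', h2'⟩ := ih rest [c]
        rw [h1] at h1'
        obtain ⟨hH, hT⟩ := List.cons.inj h1'
        refine ⟨c :: H, T, ?_, ?_⟩
        · simp only [PySem.Chars.splitOn.go, h, Bool.false_eq_true, if_false]
          rw [h2', ← hH, ← hT]
          simp
        · simp only [PySem.Chars.splitOn.go, h, Bool.false_eq_true, if_false]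
          rw [h2]
          simp

theorem pv_splitOn_nil : PySem.Chars.splitOn [] ['\n'] = [[]] := by decide

theorem pv_splitOn_cons_nl (cs : List Char) :
    PySem.Chars.splitOn ('\n' :: cs) ['\n'] = [] :: PySem.Chars.splitOn cs ['\n'] := by
  show PySem.Chars.splitOn.go ['\n'] (cs.length + 1 + 1) ('\n' :: cs) [] [] = _
  simp only [PySem.Chars.splitOn.go, List.isPrefixOf]
  rw [if_pos (by simp), pv_go_acc]
  simp [PySem.Chars.splitOn]

theorem pv_splitOn_cons_ne (c : Char) (cs : List Char) (h : c ≠ '\n') :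
    ∃ H T, PySem.Chars.splitOn cs ['\n'] = H :: T ∧
      PySem.Chars.splitOn (c :: cs) ['\n'] = (c :: H) :: T := by
  obtain ⟨H, T, h1, h2⟩ := pv_go_cur ['\n'] (cs.length + 1) cs [c]
  refine ⟨H, T, h1, ?_⟩
  show PySem.Chars.splitOn.go ['\n'] (cs.length + 1 + 1) (c :: cs) [] [] = _
  have hp : (['\n'].isPrefixOf (c :: cs)) ≠ true := by
    simp [List.isPrefixOf]; exact fun hc => absurd hc.symm h
  simp only [PySem.Chars.splitOn.go]
  rw [if_neg hp, h2]
  simp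

-- the loop with shifted index/total
theorem pv_loopA_shift : ∀ (L : List (List Char)) (ci idx total : Int),
    pvLoopA ci L idx total = idx + pvLoopA (ci - total) L 0 0 := by
  intro L
  induction L with
  | nil => intro ci idx total; simp [pvLoopA]
  | cons line rest ih =>
    intro ci idx total
    simp only [pvLoopA]
    by_cases h : total + (line.length : Int) + 1 > ci
    · rw [if_pos h, if_pos (by omega)]; omega
    · rw [if_neg h, if_neg (by omega), ih ci (idx + 1), ih (ci - total) (0 + 1)]
      have : ci - (total + (line.length : Int) + 1) = ci - total - (0 + (line.length : Int) + 1) := by omega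
      rw [this]; omega

-- count.go for the single-character pattern
theorem pv_countgo (fuel : Nat) : ∀ (l : List Char) (acc : Nat), l.length ≤ fuel →
    PySem.Chars.count.go ['\n'] fuel l acc = acc + l.count '\n' := by
  induction fuel with
  | zero =>
    intro l acc h
    have : l = [] := List.eq_nil_of_length_eq_zero (Nat.le_zero.mp h)
    subst this; simp [PySem.Chars.count.go]
  | succ f ih =>
    intro l acc h
    cases l with
    | nil => simp [PySem.Chars.count.go]
    | cons c rest =>
      simp only [PySem.Chars.count.go, List.isPrefixOf]
      by_cases hc : c = '\n'
      · subst hc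
        rw [if_pos (by simp)]
        simp only [List.length, List.drop]
        rw [ih rest (acc + 1) (by simpa using h)]
        simp; omega
      · rw [if_neg (by simp; exact fun hx => absurd hx.symm hc)]
        rw [ih rest acc (by simpa using h)]
        simp [hc]

theorem pv_count_single (cs : List Char) : PySem.Chars.count cs ['\n'] = cs.count '\n' := by
  simp only [PySem.Chars.count, List.isEmpty]
  rw [if_neg (by simp)]
  rw [pv_countgo cs.length cs 0 (le_refl _)]
  omega

-- the main correspondence: A's loop over the split equals the newline count of the prefix
theorem pv_main (cs : List Char) : ∀ (ci : Int), ci ≤ (cs.length : Int) →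
    pvLoopA ci (PySem.Chars.splitOn cs ['\n']) 0 0 = ((cs.take ci.toNat).count '\n' : Int) := by
  induction cs with
  | nil =>
    intro ci h
    rw [pv_splitOn_nil]
    simp only [pvLoopA, List.length_nil, Nat.cast_zero]
    rw [if_pos (by simp at h; omega)]
    simp
  | cons c rest ih =>
    intro ci h
    by_cases hc : c = '\n'
    · subst hc
      rw [pv_splitOn_cons_nl]
      simp only [pvLoopA, List.length_nil, Nat.cast_zero]
      by_cases h1 : (0 : Int) + 0 + 1 > ci
      · rw [if_pos h1]
        have : ci.toNat = 0 := by omega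
        simp [this]
      · rw [if_neg h1, pv_loopA_shift]
        have e : ci - (0 + 0 + 1) = ci - 1 := by omega
        rw [e, ih (ci - 1) (by simp at h ⊢; omega)]
        have : ci.toNat = (ci - 1).toNat + 1 := by omega
        rw [this, List.take_succ_cons]
        simp; omega
    · obtain ⟨H, T, h1, h2⟩ := pv_splitOn_cons_ne c rest hc
      rw [h2]
      have key : pvLoopA ci ((c :: H) :: T) 0 0 = pvLoopA (ci - 1) (H :: T) 0 0 := by
        simp only [pvLoopA]
        by_cases hcond : (0 : Int) + ((c :: H).length : Int) + 1 > ci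
        · rw [if_pos hcond, if_pos (by simp at hcond ⊢; omega)]
        · rw [if_neg hcond, if_neg (by simp at hcond ⊢; omega)]
          rw [pv_loopA_shift T ci, pv_loopA_shift T (ci - 1)]
          have : ci - (0 + ((c :: H).length : Int) + 1) = ci - 1 - (0 + (H.length : Int) + 1) := by
            simp; omega
          rw [this]
      rw [key, ← h1, ih (ci - 1) (by simp at h ⊢; omega)]
      by_cases hpos : 1 ≤ ci
      · have : ci.toNat = (ci - 1).toNat + 1 := by omega
        rw [this, List.take_succ_cons]
        simp [hc]
      · have h0 : ci.toNat = 0 := by omega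
        have h0' : (ci - 1).toNat = 0 := by omega
        simp [h0, h0']

-- ===== VERDICT (by name: the statement is the Claim_ definition above) =====
theorem get_line_index_by_char_index_spec : Claim_equal_get_line_index_by_char_index := by
  intro s ci _ hpre
  unfold Spec_get_line_index_by_char_index
  unfold get_line_index_by_char_index get_line_index_by_char_index_alt
  unfold Pre_get_line_index_by_char_index at hpre
  rw [if_neg (by omega)]
  have hlen : PySem.Str.len s = (s.toList.length : Int) := by
    simp [PySem.Str.len]
  rw [PySem.Chars.slice_eq_listSlice, PySem.List.slice_to _ (by omega)]
  rw [pv_count_single]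
  have : (max ci 0).toNat = ci.toNat := by omega
  rw [this, pv_main s.toList ci (by omega)]
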